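-- pv_equiv track=rewrite | github.com/orcunTasdemir/codeStudy | test.py | getHighestSum
-- ===== SOURCE A (Python) =====
-- def getHighestSum(l, wS):
--     sums = []
--     for i in range(len(l)):
--         sum = 0
--         for idx in range(i, i+wS-1):
--             if idx < len(l):
--                 sum += l[idx]
--         sums.append(sum)
--     return max(sums)
-- ===== SOURCE B (Python) =====
-- def getHighestSum(l, wS):
--     # prefix sums: each clamped window sum in O(1) instead of an O(w) inner loop
--     pre = [0]
--     for x in l:
--         pre.append(pre[-1] + x)
--     n = len(l)
--     k = wS - 1
--     return max(pre[min(n, i + k)] - pre[i] if min(n, i + k) > i else 0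
--                for i in range(n))
-- ===== Notes on version B (the rewrite author's own statement) =====
-- stated objective: faster
-- what changed: B precomputes prefix sums once and gets each clamped window sum by one subtraction, replacing A's O(w) inner loop per position.
import Mathlib
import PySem

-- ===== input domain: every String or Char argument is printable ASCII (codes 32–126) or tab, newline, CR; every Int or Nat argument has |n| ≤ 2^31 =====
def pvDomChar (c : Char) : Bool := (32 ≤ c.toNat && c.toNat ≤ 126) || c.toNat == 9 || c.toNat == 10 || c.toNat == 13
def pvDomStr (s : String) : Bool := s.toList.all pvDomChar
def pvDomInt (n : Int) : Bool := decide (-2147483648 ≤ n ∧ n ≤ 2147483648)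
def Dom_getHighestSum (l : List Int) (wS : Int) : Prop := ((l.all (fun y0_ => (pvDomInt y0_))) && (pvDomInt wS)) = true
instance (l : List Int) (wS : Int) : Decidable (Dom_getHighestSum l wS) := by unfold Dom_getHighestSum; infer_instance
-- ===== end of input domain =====

-- B replaces A's O(w) inner summation loop per position by prefix sums and one subtraction (O(n·w) → O(n)).

-- ===== PORT A =====
-- literal port of A: for each i in range(len(l)), sum l[idx] for idx in range(i, i+wS-1) guarded by idx < len(l);
-- append to sums; return max(sums).  max([]) raises ValueError in Python: excluded by Pre_, .getD 0 is never the result there.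
def getHighestSum (l : List Int) (wS : Int) : Int :=
  let sums := (PySem.List.pyRange 0 (l.length : Int) 1).foldl
    (fun acc i =>
      acc ++ [(PySem.List.pyRange i (i + wS - 1) 1).foldl
        (fun s idx => if idx < (l.length : Int) then s + PySem.List.pyGetD l idx 0 else s) 0]) []
  (PySem.List.max? sums (fun y => y)).getD 0

-- ===== PORT B =====
-- literal port of Source B: build the prefix-sum list pre (pre[-1] is the last element), then
-- max over i of pre[min(n, i+k)] - pre[i] (window clamped at the right end), 0 for an empty window.
def getHighestSum_alt (l : List Int) (wS : Int) : Int :=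
  let pre := l.foldl (fun p x => p ++ [PySem.List.pyGetD p (-1) 0 + x]) [0]
  let n : Int := l.length
  let k := wS - 1
  let sums := (PySem.List.pyRange 0 n 1).map (fun i =>
    if min n (i + k) > i
    then PySem.List.pyGetD pre (min n (i + k)) 0 - PySem.List.pyGetD pre i 0
    else 0)
  (PySem.List.max? sums (fun y => y)).getD 0

-- ===== PRECONDITION & SPEC =====
-- Pre_ excludes only l = [], where Python's max([]) (in A and in B alike) raises ValueError.
def Pre_getHighestSum (l : List Int) (wS : Int) : Prop := l ≠ []
instance (l : List Int) (wS : Int) : Decidable (Pre_getHighestSum l wS) := by unfold Pre_getHighestSum; infer_instance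
def pvWitness_getHighestSum : List Int × Int := ([1, -2, 3], 2)

def Spec_getHighestSum (l : List Int) (wS : Int) (out : Int) : Prop := out = getHighestSum_alt l wS
instance (l : List Int) (wS : Int) (out : Int) : Decidable (Spec_getHighestSum l wS out) := by unfold Spec_getHighestSum; infer_instance

-- ===== CLAIM (what is proved, stated in full; the proofs are below) =====
def Claim_equal_getHighestSum : Prop := ∀ (l : List Int) (wS : Int), Dom_getHighestSum l wS → Pre_getHighestSum l wS → Spec_getHighestSum l wS (getHighestSum l wS)

-- ===== LEMMAS AND PROOFS =====

-- A's guarded inner loop as a sum of a map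
theorem innerA_eq_sum (l : List Int) (a b : Int) :
    (PySem.List.pyRange a b 1).foldl
      (fun s idx => if idx < (l.length : Int) then s + PySem.List.pyGetD l idx 0 else s) 0
    = ((PySem.List.pyRange a b 1).map
        (fun idx => if idx < (l.length : Int) then PySem.List.pyGetD l idx 0 else 0)).sum := by
  have h : (fun s idx => if idx < (l.length : Int) then s + PySem.List.pyGetD l idx 0 else s)
      = (fun (s idx : Int) => s + (if idx < (l.length : Int) then PySem.List.pyGetD l idx 0 else 0)) := by
    funext s idx; split <;> simp
  rw [h, PySem.List.foldl_add]; simp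

-- the guarded sum over indices a..a+m-1 is the sum of the clamped window take m (drop a l)
theorem window_sum (l : List Int) (a : Int) (ha : 0 ≤ a) (m : Nat) :
    ((PySem.List.pyRange a (a + m) 1).map
       (fun idx => if idx < (l.length : Int) then PySem.List.pyGetD l idx 0 else 0)).sum
    = ((l.drop a.toNat).take m).sum := by
  induction m with
  | zero => simp [PySem.List.pyRange_one_eq_nil (le_refl a)]
  | succ m ih =>
    have hle : a ≤ a + (m : Int) := by omega
    have : (a : Int) + ((m + 1 : Nat) : Int) = (a + m) + 1 := by push_cast; ring
    rw [this, PySem.List.pyRange_one_succ_right hle]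
    rw [List.map_append, List.sum_append, ih]
    rw [List.take_add_one]
    rw [List.sum_append]
    congr 1
    simp only [List.map_cons, List.map_nil, List.sum_cons, List.sum_nil, add_zero]
    by_cases hlt : a + (m : Int) < (l.length : Int)
    · have hidx : a.toNat + m < l.length := by omega
      have hcast : a + (m : Int) = ((a.toNat + m : Nat) : Int) := by omega
      rw [if_pos hlt, hcast, PySem.List.pyGetD_natCast]
      have : (List.drop a.toNat l)[m]? = some l[a.toNat + m] := by
        rw [List.getElem?_drop]; exact List.getElem?_eq_getElem hidx
      rw [this]
      simp [List.getD, List.getElem?_eq_getElem hidx]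
    · have hidx : l.length ≤ a.toNat + m := by omega
      have : (List.drop a.toNat l)[m]? = none := by
        rw [List.getElem?_drop, List.getElem?_eq_none_iff]; omega
      rw [if_neg hlt, this]
      simp

-- A's inner loop for arbitrary upper bound b
theorem innerA_window (l : List Int) (a b : Int) (ha : 0 ≤ a) :
    (PySem.List.pyRange a b 1).foldl
      (fun s idx => if idx < (l.length : Int) then s + PySem.List.pyGetD l idx 0 else s) 0
    = ((l.drop a.toNat).take (b - a).toNat).sum := by
  rw [innerA_eq_sum]
  by_cases hb : b ≤ a
  · rw [PySem.List.pyRange_one_eq_nil hb]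
    have : (b - a).toNat = 0 := by omega
    simp [this]
  · have hb' : b = a + ((b - a).toNat : Int) := by omega
    rw [hb']
    have : (a + ((b - a).toNat : Int) - a).toNat = (b - a).toNat := by omega
    rw [this] at *
    exact window_sum l a ha (b - a).toNat

-- B's prefix-sum list is the list of take-sums
theorem pre_eq (l : List Int) :
    l.foldl (fun p x => p ++ [PySem.List.pyGetD p (-1) 0 + x]) [0]
    = (List.range (l.length + 1)).map (fun j => (l.take j).sum) := by
  induction l using List.reverseRecOn with
  | nil => simp
  | append_singleton l x ih =>
    rw [List.foldl_append, List.foldl_cons, List.foldl_nil, ih]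
    have hsplit : (List.range (l.length + 1)).map (fun j => (l.take j).sum)
        = (List.range l.length).map (fun j => (l.take j).sum) ++ [l.sum] := by
      rw [List.range_succ, List.map_append]; simp
    rw [hsplit, List.append_assoc]
    rw [PySem.List.pyGetD_neg_one_append_singleton]
    have hlen : (l ++ [x]).length + 1 = (l.length + 1) + 1 := by simp
    rw [hlen, List.range_succ, List.map_append]
    have h1 : (List.range (l.length + 1)).map (fun j => ((l ++ [x]).take j).sum)
        = (List.range (l.length + 1)).map (fun j => (l.take j).sum) := by
      apply List.map_congr_left
      intro j hj
      rw [List.mem_range] at hj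
      rw [List.take_append_of_le_length (by omega)]
    rw [h1, hsplit, List.append_assoc]
    congr 2
    simp

-- indexing the prefix-sum list
theorem pre_get (l : List Int) (j : Int) (h0 : 0 ≤ j) (hn : j ≤ (l.length : Int)) :
    PySem.List.pyGetD ((List.range (l.length + 1)).map (fun j => (l.take j).sum)) j 0
    = (l.take j.toNat).sum := by
  have : j = ((j.toNat : Nat) : Int) := by omega
  rw [this, PySem.List.pyGetD_natCast]
  exact PySem.List.getD_map_range _ _ _ _ (by omega)

-- per-position agreement of the two window values
theorem elem_eq (l : List Int) (wS : Int) (i : Int) (h0 : 0 ≤ i) (hn : i < (l.length : Int)) :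
    ((l.drop i.toNat).take (i + wS - 1 - i).toNat).sum
    = (if min (l.length : Int) (i + (wS - 1)) > i
       then (l.take (min (l.length : Int) (i + (wS - 1))).toNat).sum - (l.take i.toNat).sum
       else 0) := by
  by_cases hw : min (l.length : Int) (i + (wS - 1)) > i
  · rw [if_pos hw]
    set e : Int := min (l.length : Int) (i + (wS - 1)) with he
    have he0 : i ≤ e := le_of_lt hw
    have hele : e ≤ (l.length : Int) := min_le_left _ _
    have : l.take e.toNat = l.take i.toNat ++ (l.drop i.toNat).take (e.toNat - i.toNat) := by
      rw [← List.take_add]; congr 1; omega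
    rw [this, List.sum_append]
    have : (l.take i.toNat).sum + ((l.drop i.toNat).take (e.toNat - i.toNat)).sum - (l.take i.toNat).sum
        = ((l.drop i.toNat).take (e.toNat - i.toNat)).sum := by ring
    rw [this]
    -- the two takes agree: either the window fits, or both clamp to the whole suffix
    by_cases hfit : i + (wS - 1) ≤ (l.length : Int)
    · have : e.toNat - i.toNat = (i + wS - 1 - i).toNat := by omega
      rw [this]
    · have hlen : (l.drop i.toNat).length = l.length - i.toNat := by simp
      have h1 : (l.drop i.toNat).length ≤ e.toNat - i.toNat := by omega
      have h2 : (l.drop i.toNat).length ≤ (i + wS - 1 - i).toNat := by omega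
      rw [List.take_of_length_le h1, List.take_of_length_le h2]
  · rw [if_neg hw]
    have : (i + wS - 1 - i).toNat = 0 := by omega
    simp [this]

-- ===== VERDICT (by name: the statement is the Claim_ definition above) =====
theorem getHighestSum_spec : Claim_equal_getHighestSum := by
  intro l wS _ _
  unfold Spec_getHighestSum getHighestSum getHighestSum_alt
  rw [PySem.List.foldl_append_singleton_eq_map, List.nil_append, pre_eq]
  dsimp only
  congr 2
  apply List.map_congr_left
  intro i hi
  rw [PySem.List.mem_pyRange_one] at hi
  rw [innerA_window l i _ hi.1]
  by_cases hw : min (l.length : Int) (i + (wS - 1)) > i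
  · rw [elem_eq l wS i hi.1 hi.2, if_pos hw, if_pos hw]
    have hele : min (l.length : Int) (i + (wS - 1)) ≤ (l.length : Int) := min_le_left _ _
    rw [pre_get l _ (by omega) hele, pre_get l i hi.1 (le_of_lt hi.2)]
  · rw [elem_eq l wS i hi.1 hi.2, if_neg hw, if_neg hw]
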